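-- pv_equiv track=rewrite | github.com/Arsen1302/Code-copy-detector | TestData/solutions/problem_1213_4.py | solution_1213_4
-- ===== SOURCE A (Python) =====
-- def solution_1213_4(s: str) -> bool:
--
--     f = False
--     for i in s:
--         if i == '1':
--             if not f:
--                 continue
--             else:
--                 return False
--         else:
--             f = True
--     return True
-- ===== SOURCE B (Python) =====
-- def solution_1213_4(s: str) -> bool:
--     return '1' not in s.lstrip('1')
-- ===== Notes on version B (the rewrite author's own statement) =====
-- stated objective: simpler
-- what changed: Replaces the stateful flag loop with an early return by stripping the leading run of '1's and doing a plain membership test on the remainder.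
import Mathlib
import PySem

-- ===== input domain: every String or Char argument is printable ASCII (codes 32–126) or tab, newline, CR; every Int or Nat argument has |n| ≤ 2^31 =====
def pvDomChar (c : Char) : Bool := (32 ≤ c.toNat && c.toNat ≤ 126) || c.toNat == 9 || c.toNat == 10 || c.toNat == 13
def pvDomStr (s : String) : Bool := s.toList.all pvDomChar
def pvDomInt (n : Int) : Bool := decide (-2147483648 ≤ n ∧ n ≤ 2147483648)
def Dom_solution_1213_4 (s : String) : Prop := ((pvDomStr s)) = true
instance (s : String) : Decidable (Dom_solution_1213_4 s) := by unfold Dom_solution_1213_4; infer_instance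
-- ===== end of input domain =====

-- B replaces A's stateful flag loop with lstrip('1') followed by a membership test (simpler).

-- ===== PORT A =====
-- loop over the characters with flag f; early return False becomes the `false` branch
def solution_1213_4_loop (l : List Char) (f : Bool) : Bool :=
  match l with
  | [] => true
  | c :: cs =>
    if c = '1' then
      if !f then solution_1213_4_loop cs f
      else false
    else solution_1213_4_loop cs true

def solution_1213_4 (s : String) : Bool :=
  solution_1213_4_loop s.toList false

-- ===== PORT B =====
-- s.lstrip('1') = dropWhile (· = '1');  '1' not in rest = !rest.contains '1' (exact on all strings)
def solution_1213_4_alt (s : String) : Bool :=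
  !((s.toList.dropWhile (fun c => c = '1')).contains '1')

-- ===== PRECONDITION & SPEC =====
def Spec_solution_1213_4 (s : String) (out : Bool) : Prop := out = solution_1213_4_alt s
instance (s : String) (out : Bool) : Decidable (Spec_solution_1213_4 s out) := by unfold Spec_solution_1213_4; infer_instance

-- ===== CLAIM (what is proved, stated in full; the proofs are below) =====
def Claim_equal_solution_1213_4 : Prop := ∀ (s : String), Dom_solution_1213_4 s → Spec_solution_1213_4 s (solution_1213_4 s)

-- ===== LEMMAS AND PROOFS =====
theorem solution_1213_4_loop_true (l : List Char) :
    solution_1213_4_loop l true = !(l.contains '1') := by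
  induction l with
  | nil => simp [solution_1213_4_loop]
  | cons c cs ih =>
    by_cases h : c = '1' <;> simp [solution_1213_4_loop, h, ih]
    exact fun _ he => h he.symm

theorem solution_1213_4_loop_false (l : List Char) :
    solution_1213_4_loop l false = !((l.dropWhile (fun c => c = '1')).contains '1') := by
  induction l with
  | nil => simp [solution_1213_4_loop]
  | cons c cs ih =>
    by_cases h : c = '1'
    · simp [solution_1213_4_loop, h, ih, List.dropWhile]
    · simp [solution_1213_4_loop, h, List.dropWhile, solution_1213_4_loop_true]
      exact fun _ he => h he.symm

-- ===== VERDICT (by name: the statement is the Claim_ definition above) =====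
theorem solution_1213_4_spec : Claim_equal_solution_1213_4 := by
  intro s _
  unfold Spec_solution_1213_4 solution_1213_4 solution_1213_4_alt
  exact solution_1213_4_loop_false s.toList
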